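-- pv_equiv track=rewrite | github.com/hopeolaide/adagrams-py | adagrams/game.py | get_highest_word_score
-- ===== SOURCE A (Python) =====
-- SCORE_CHART = {
--     'A': 1,
--     'B': 3,
--     'C': 3,
--     'D': 2,
--     'E': 1,
--     'F': 4,
--     'G': 2,
--     'H': 4,
--     'I': 1,
--     'J': 8,
--     'K': 5,
--     'L': 1,
--     'M': 3,
--     'N': 1,
--     'O': 1,
--     'P': 3,
--     'Q': 10,
--     'R': 1,
--     'S': 1,
--     'T': 1,
--     'U': 1,
--     'V': 4,
--     'W': 4,
--     'X': 8,
--     'Y': 4,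
--     'Z': 10
--
--     }
--
-- def score_word(word):
--     """
-- Wave 3: score_word
-- Returns the score of a given word as defined by the Adagrams game.
--
-- The number of points of each letter is summed up to represent the total score of word
-- Each letter's point value is described in the table below
-- If the length of the word is 7, 8, 9, or 10, then the word gets an additional 8 points
--
-- """
--     input_word = word.upper()
--     word_score = 0
--     word_length = len(input_word)
--
--     if input_word == "":
--         return 0
--
--     for letter in input_word:
--         word_score += SCORE_CHART[letter]
--
--     if word_length >= 7:
--         word_score += 8
--
--     return word_score
--
-- def get_highest_word_score(word_list):
--     best_word_list = []
--     best_score_list =[]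
--
-- # Translating word list and scores into a dictionary and finding highest word score in dictionary:
--     for word in word_list:
--         word_score_dict = {word: score_word(word) for word in word_list}    #Dictionary comprehension
--         highest_word_score = max(word_score_dict.values())
--
-- # Max only returns the first match so we need to check which (if any) other values == highest score
-- # Once clear append the keys for those highest_scores values to the best_word_list.
--     for word in word_score_dict:
--         if word_score_dict[word] == highest_word_score:
--             best_word_list.append(word)
--             best_score_list.append(word_score_dict[word])
--
-- #Conditional check to see if length is more than 1 then apply tie-breaker logic
-- # (see helper function further below)
--     best_word = best_word_list[0] if len(best_word_list) == 1 else tie_breaker(best_word_list)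
--
--     return (best_word, highest_word_score)
--
-- def tie_breaker(best_word_list):
--     for word in best_word_list:
--         if len(word) == 10:
--             return word
--
--     return min(best_word_list, key = len)
-- ===== SOURCE B (Python) =====
-- SCORE_CHART = {
--     'A': 1, 'B': 3, 'C': 3, 'D': 2, 'E': 1, 'F': 4, 'G': 2, 'H': 4,
--     'I': 1, 'J': 8, 'K': 5, 'L': 1, 'M': 3, 'N': 1, 'O': 1, 'P': 3,
--     'Q': 10, 'R': 1, 'S': 1, 'T': 1, 'U': 1, 'V': 4, 'W': 4, 'X': 8,
--     'Y': 4, 'Z': 10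
-- }
--
--
-- def score_word(word):
--     input_word = word.upper()
--     if input_word == "":
--         return 0
--     word_score = sum(SCORE_CHART[letter] for letter in input_word)
--     if len(input_word) >= 7:
--         word_score += 8
--     return word_score
--
--
-- def _beats(challenger, champion):
--     """True iff challenger strictly outranks champion:
--     higher score first; then a length-10 word outranks any other;
--     then the shorter word wins.  (First occurrence keeps the crown on ties.)"""
--     sc, sb = score_word(challenger), score_word(champion)
--     if sc != sb:
--         return sc > sb
--     if (len(challenger) == 10) != (len(champion) == 10):
--         return len(challenger) == 10
--     return len(challenger) < len(champion)
--
--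
-- def get_highest_word_score(word_list):
--     best = word_list[0]
--     for word in word_list[1:]:
--         if _beats(word, best):
--             best = word
--     return (best, score_word(best))
-- ===== Notes on version B (the rewrite author's own statement) =====
-- stated objective: simpler
-- what changed: Replaces the dict rebuilt once per word, the max-over-values pass, the filter into best_word_list/best_score_list and the separate tie_breaker helper by a single left-to-right pass that keeps the current champion under one composite comparison (score, then length-10 flag, then shorter length).
import Mathlib
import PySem

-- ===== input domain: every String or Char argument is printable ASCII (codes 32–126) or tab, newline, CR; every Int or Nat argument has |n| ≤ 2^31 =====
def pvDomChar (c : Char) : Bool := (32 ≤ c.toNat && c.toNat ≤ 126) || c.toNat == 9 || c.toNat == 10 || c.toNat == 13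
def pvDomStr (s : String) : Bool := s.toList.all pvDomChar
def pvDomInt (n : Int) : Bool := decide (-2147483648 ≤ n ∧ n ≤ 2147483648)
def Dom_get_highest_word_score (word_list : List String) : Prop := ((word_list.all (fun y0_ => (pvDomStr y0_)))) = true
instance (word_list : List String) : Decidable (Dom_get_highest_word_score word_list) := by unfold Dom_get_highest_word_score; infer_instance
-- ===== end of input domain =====

-- B replaces A's per-word dict rebuild, max-over-values, filter and tie_breaker helper by one
-- left-to-right pass keeping the current champion under a composite comparison (objective: simpler).

-- ===== PORT A =====

def pvScoreChart : PySem.Dict Char Int :=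
  PySem.Dict.ofList
    [('A', 1), ('B', 3), ('C', 3), ('D', 2), ('E', 1), ('F', 4), ('G', 2), ('H', 4),
     ('I', 1), ('J', 8), ('K', 5), ('L', 1), ('M', 3), ('N', 1), ('O', 1), ('P', 3),
     ('Q', 10), ('R', 1), ('S', 1), ('T', 1), ('U', 1), ('V', 4), ('W', 4), ('X', 8),
     ('Y', 4), ('Z', 10)]

def score_word (word : String) : Int :=
  let input_word := PySem.Str.upper word
  let word_length := PySem.Str.len input_word
  if input_word = "" then 0
  else
    -- SCORE_CHART[letter]: a missing key (KeyError) is excluded by Pre_; getD 0 is exact on 'A'-'Z'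
    let word_score := input_word.toList.foldl (fun acc letter => acc + pvScoreChart.getD letter 0) 0
    if 7 ≤ word_length then word_score + 8 else word_score

def tie_breaker (best_word_list : List String) : String :=
  match best_word_list.find? (fun word => PySem.Str.len word == 10) with
  | some word => word
  | none => (PySem.List.min? best_word_list (fun word => PySem.Str.len word)).getD ""
    -- min() of a nonempty list; the default "" is never used under Pre_

def get_highest_word_score (word_list : List String) : String × Int :=
  let st :=
    word_list.foldl
      (fun (_ : PySem.Dict String Int × Int) (_ : String) =>
        let word_score_dict :=
          word_list.foldl (fun d word => d.insert word (score_word word)) PySem.Dict.empty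
        (word_score_dict,
         (PySem.List.max? word_score_dict.values (fun v => v)).getD 0))
      (PySem.Dict.empty, 0)   -- for word_list = [] the names stay unbound (UnboundLocalError): excluded by Pre_
  let word_score_dict := st.1
  let highest_word_score := st.2
  let bl :=
    word_score_dict.keys.foldl
      (fun (p : List String × List Int) word =>
        if word_score_dict.getD word 0 = highest_word_score then
          (p.1 ++ [word], p.2 ++ [word_score_dict.getD word 0])
        else p)
      ([], [])
  let best_word :=
    if bl.1.length = 1 then PySem.List.pyGetD bl.1 0 "" else tie_breaker bl.1
  (best_word, highest_word_score)

-- ===== PORT B =====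

def pvBeats (challenger champion : String) : Bool :=
  let sc := score_word challenger
  let sb := score_word champion
  if sc ≠ sb then decide (sb < sc)
  else if decide (PySem.Str.len challenger = 10) ≠ decide (PySem.Str.len champion = 10) then
    decide (PySem.Str.len challenger = 10)
  else decide (PySem.Str.len challenger < PySem.Str.len champion)

def get_highest_word_score_alt (word_list : List String) : String × Int :=
  match word_list with
  | [] => ("", 0)   -- word_list[0] raises IndexError; excluded by Pre_
  | w :: rest =>
    let best := rest.foldl (fun best word => if pvBeats word best then word else best) w
    (best, score_word best)

-- ===== PRECONDITION & SPEC =====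

-- Pre_ excludes exactly the inputs on which the Python A raises: the empty list (UnboundLocalError)
-- and any word containing a non-letter character (KeyError in score_word).
def Pre_get_highest_word_score (word_list : List String) : Prop :=
  word_list ≠ [] ∧ (word_list.all (fun w => w.toList.all (fun c => PySem.Str.isalpha c))) = true

instance (word_list : List String) : Decidable (Pre_get_highest_word_score word_list) := by
  unfold Pre_get_highest_word_score; infer_instance

def pvWitness_get_highest_word_score : List String := ["cat", "bee"]

def Spec_get_highest_word_score (word_list : List String) (out : String × Int) : Prop :=
  out = get_highest_word_score_alt word_list
instance (word_list : List String) (out : String × Int) : Decidable (Spec_get_highest_word_score word_list out) := by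
  unfold Spec_get_highest_word_score; infer_instance

-- ===== CLAIM (what is proved, stated in full; the proofs are below) =====
def Claim_equal_get_highest_word_score : Prop := ∀ (word_list : List String), Dom_get_highest_word_score word_list → Pre_get_highest_word_score word_list → Spec_get_highest_word_score word_list (get_highest_word_score word_list)

-- ===== LEMMAS AND PROOFS =====

-- the composite rank B compares by: score, then the length-10 flag, then shorter length (lexicographic)
def pvKey (w : String) : Lex (Int × Lex (Bool × Int)) :=
  toLex (score_word w, toLex (decide (PySem.Str.len w = 10), -(PySem.Str.len w : Int)))

theorem pv_key_lt_iff (b x : String) :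
    pvKey b < pvKey x ↔
      score_word b < score_word x ∨
        (score_word b = score_word x ∧
          ((PySem.Str.len b ≠ 10 ∧ PySem.Str.len x = 10) ∨
           ((PySem.Str.len b = 10 ↔ PySem.Str.len x = 10) ∧ PySem.Str.len x < PySem.Str.len b))) := by
  unfold pvKey
  simp only [Prod.Lex.lt_iff, ofLex_toLex, Bool.lt_iff, decide_eq_true_eq,
    decide_eq_false_iff_not, decide_eq_decide, PySem.Str.len_eq]
  omega

theorem pv_key_le_iff (y a : String) :
    pvKey y ≤ pvKey a ↔
      score_word y < score_word a ∨
        (score_word y = score_word a ∧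
          ((PySem.Str.len y ≠ 10 ∧ PySem.Str.len a = 10) ∨
           ((PySem.Str.len y = 10 ↔ PySem.Str.len a = 10) ∧ PySem.Str.len a ≤ PySem.Str.len y))) := by
  unfold pvKey
  simp only [Prod.Lex.le_iff, Prod.Lex.lt_iff, ofLex_toLex, Bool.lt_iff,
    decide_eq_true_eq, decide_eq_false_iff_not, decide_eq_decide, PySem.Str.len_eq]
  omega

theorem pvBeats_eq (x b : String) : pvBeats x b = decide (pvKey b < pvKey x) := by
  rw [Bool.eq_iff_iff, decide_eq_true_eq, pv_key_lt_iff]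
  simp only [pvBeats]
  split_ifs with h1 h2 <;>
    simp only [decide_eq_true_eq, decide_eq_decide, ne_eq, not_not, PySem.Str.len_eq] at * <;>
    omega

-- a fold that ignores its accumulator and element returns the constant (nonempty list)
theorem pv_foldl_const {α β : Type} (c : β) :
    ∀ (t : List α) (b : β), t.foldl (fun _ _ => c) b = if t = [] then b else c := by
  intro t
  induction t with
  | nil => intro b; simp
  | cons x t ih => intro b; simp [List.foldl_cons, ih]

-- lookups in the comprehension dict are score_word
theorem pv_getD_scores : ∀ (l : List String) (d : PySem.Dict String Int) (w : String),
    (l.foldl (fun d word => d.insert word (score_word word)) d).getD w 0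
      = if w ∈ l then score_word w else d.getD w 0 := by
  intro l
  induction l with
  | nil => intro d w; simp
  | cons a t ih =>
    intro d w
    simp only [List.foldl_cons]
    rw [ih]
    by_cases hw : w ∈ t
    · simp [hw]
    · by_cases hwa : w = a
      · subst hwa; simp [hw, PySem.Dict.getD_insert_self]
      · simp [hw, hwa, PySem.Dict.getD_insert_of_ne _ _ _ hwa]

-- first component of A's append-append filter loop
theorem pv_fold_filter (C : String → Prop) [DecidablePred C] (g : String → Int) :
    ∀ (ks : List String) (acc : List String × List Int),
      (ks.foldl (fun p w => if C w then (p.1 ++ [w], p.2 ++ [g w]) else p) acc).1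
        = acc.1 ++ ks.filter (fun w => decide (C w)) := by
  intro ks
  induction ks with
  | nil => intro acc; simp
  | cons a t ih =>
    intro acc
    simp only [List.foldl_cons]
    by_cases h : C a
    · rw [if_pos h, ih]; simp [List.filter_cons, h]
    · rw [if_neg h, ih]; simp [List.filter_cons, h]

-- find? over a PySem set built by folding add
theorem pv_find?_foldl_add {α : Type} [BEq α] [LawfulBEq α] (p : α → Bool) :
    ∀ (t s : List α), List.find? p (t.foldl PySem.Set.add s) = (List.find? p s).or (List.find? p t) := by
  intro t
  induction t with
  | nil => intro s; simp
  | cons x t ih =>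
    intro s
    simp only [List.foldl_cons]
    rw [ih]
    by_cases hx : x ∈ s
    · rw [show PySem.Set.add s x = s from by simp [PySem.Set.add, hx]]
      by_cases hpx : p x = true
      · obtain ⟨z, hz⟩ := Option.isSome_iff_exists.mp (List.find?_isSome.mpr ⟨x, hx, hpx⟩)
        simp [hz]
      · rw [List.find?_cons_of_neg (by simp [hpx])]
    · rw [show PySem.Set.add s x = s ++ [x] from by simp [PySem.Set.add, hx]]
      rw [List.find?_append]
      cases hfs : List.find? p s
      · by_cases hpx : p x = true
        · rw [List.find?_cons_of_pos hpx]; simp [hpx]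
        · rw [List.find?_cons_of_neg (by simp [hpx])]; simp [hpx]
      · simp

theorem pv_find?_congr {α : Type} {p q : α → Bool} :
    ∀ (l : List α), (∀ x ∈ l, p x = q x) → l.find? p = l.find? q := by
  intro l
  induction l with
  | nil => intro _; rfl
  | cons a t ih =>
    intro h
    have ha := h a (List.mem_cons_self)
    have ht := ih fun x hx => h x (List.mem_cons_of_mem a hx)
    simp only [List.find?_cons, ha, ht]

-- the champion fold computes the first element whose key is maximal
theorem pv_find?_cons_max {α κ : Type} [LinearOrder κ] (key : α → κ) :
    ∀ (t : List α) (a : α),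
      List.find? (fun w => decide (∀ y ∈ a :: t, key y ≤ key w)) (a :: t)
        = some (t.foldl (fun b x => if key b < key x then x else b) a) := by
  intro t
  induction t with
  | nil =>
    intro a
    simp
  | cons x t ih =>
    intro a
    simp only [List.foldl_cons]
    by_cases h : key a < key x
    · rw [if_pos h, ← ih x]
      rw [List.find?_cons_of_neg (by
        simp only [decide_eq_true_eq, not_forall]
        exact ⟨x, by simp, not_le.mpr h⟩)]
      apply pv_find?_congr
      intro w hw
      simp only [decide_eq_decide]
      constructor
      · intro hall y hy
        rcases List.mem_cons.mp hy with rfl | hy'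
        · exact hall y (by simp)
        · exact hall y (by simp [hy'])
      · intro hall y hy
        rcases List.mem_cons.mp hy with rfl | hy'
        · exact (le_of_lt h).trans (hall x (by simp))
        · exact hall y hy'
    · have hxa : key x ≤ key a := le_of_not_gt h
      rw [if_neg h, ← ih a]
      by_cases hPa : ∀ y ∈ a :: x :: t, key y ≤ key a
      · rw [List.find?_cons_of_pos (by simpa using hPa),
            List.find?_cons_of_pos (by
              simp only [decide_eq_true_eq]
              intro y hy
              rcases List.mem_cons.mp hy with rfl | hy'
              · exact le_refl _
              · exact hPa y (by simp [hy']))]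
      · have hPa' : ¬ ∀ y ∈ a :: t, key y ≤ key a := by
          intro hall
          apply hPa
          intro y hy
          rcases List.mem_cons.mp hy with rfl | hy'
          · exact hall y (by simp)
          · rcases List.mem_cons.mp hy' with rfl | hy''
            · exact hxa
            · exact hall y (by simp [hy''])
        have hPx : ¬ ∀ y ∈ a :: x :: t, key y ≤ key x := by
          intro hall
          apply hPa
          intro y hy
          exact (hall y hy).trans hxa
        rw [List.find?_cons_of_neg (by simpa using hPa),
            List.find?_cons_of_neg (by simpa using hPx),
            List.find?_cons_of_neg (by simpa using hPa')]
        apply pv_find?_congr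
        intro w hw
        simp only [decide_eq_decide]
        constructor
        · intro hall y hy
          rcases List.mem_cons.mp hy with rfl | hy'
          · exact hall y (by simp)
          · exact hall y (by simp [hy'])
        · intro hall y hy
          rcases List.mem_cons.mp hy with rfl | hy'
          · exact hall y (by simp)
          · rcases List.mem_cons.mp hy' with rfl | hy''
            · exact hxa.trans (hall a (by simp))
            · exact hall y (by simp [hy''])

theorem pv_min?_aux {α κ : Type} [LinearOrder κ] (key : α → κ) :
    ∀ (t : List α) (m : α),
      t.foldl (fun acc x => match acc with
          | none => some x
          | some m => if key x < key m then some x else some m) (some m)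
        = some (t.foldl (fun m y => if key y < key m then y else m) m) := by
  intro t
  induction t with
  | nil => intro m; rfl
  | cons y t ih =>
    intro m
    simp only [List.foldl_cons]
    by_cases h : key y < key m
    · simp only [if_pos h]
      exact ih y
    · simp only [if_neg h]
      exact ih m

theorem pv_min?_cons {α κ : Type} [LinearOrder κ] (key : α → κ) :
    ∀ (t : List α) (x : α),
      PySem.List.min? (x :: t) key
        = some (t.foldl (fun m y => if key y < key m then y else m) x) := by
  intro t x
  unfold PySem.List.min?
  simp only [List.foldl_cons]
  exact pv_min?_aux key t x

theorem pv_hi_char (vs : List Int) (h : vs ≠ []) :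
    (PySem.List.max? vs (fun v => v)).getD 0 ∈ vs ∧
      ∀ v ∈ vs, v ≤ (PySem.List.max? vs (fun v => v)).getD 0 := by
  obtain ⟨v, vt, rfl⟩ := List.exists_cons_of_ne_nil h
  rw [PySem.List.max?_id_cons]
  simp only [Option.getD_some]
  refine ⟨?_, ?_⟩
  · rcases PySem.List.foldl_max_mem vt v with h' | h'
    · rw [h']; simp
    · exact List.mem_cons_of_mem _ h'
  · intro u hu
    rcases List.mem_cons.mp hu with rfl | hu'
    · exact (PySem.List.le_foldl_max vt u).1
    · exact (PySem.List.le_foldl_max vt v).2 u hu'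

theorem pv_if_one_tie (F : List String) (hF : F ≠ []) :
    (if F.length = 1 then PySem.List.pyGetD F 0 "" else tie_breaker F) = tie_breaker F := by
  by_cases h : F.length = 1
  · obtain ⟨u, rfl⟩ := List.length_eq_one_iff.mp h
    rw [if_pos h, PySem.List.pyGetD_zero_cons]
    unfold tie_breaker
    by_cases h10 : PySem.Str.len u = 10
    · rw [List.find?_cons_of_pos (by simp only [beq_iff_eq]; exact h10)]
    · rw [List.find?_cons_of_neg (by simp only [beq_iff_eq]; exact h10)]
      simp only [List.find?_nil]
      rw [pv_min?_cons]
      rfl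
  · rw [if_neg h]

-- A's whole selection (filter to the top score, then tie_breaker) is the first key-maximal element
theorem pv_tie_select (ks : List String) (hi : Int)
    (hmem : ∃ k ∈ ks, score_word k = hi) (hub : ∀ k ∈ ks, score_word k ≤ hi) :
    ks.find? (fun w => decide (∀ y ∈ ks, pvKey y ≤ pvKey w))
      = some (if (ks.filter (fun w => decide (score_word w = hi))).length = 1 then
                PySem.List.pyGetD (ks.filter (fun w => decide (score_word w = hi))) 0 ""
              else tie_breaker (ks.filter (fun w => decide (score_word w = hi)))) := by
  obtain ⟨k0, hk0, hk0s⟩ := hmem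
  have hk0F : k0 ∈ ks.filter (fun w => decide (score_word w = hi)) :=
    List.mem_filter.mpr ⟨hk0, by simp [hk0s]⟩
  have hFne : ks.filter (fun w => decide (score_word w = hi)) ≠ [] :=
    List.ne_nil_of_mem hk0F
  rw [pv_if_one_tie _ hFne]
  have hmemF : ∀ w, w ∈ ks.filter (fun w => decide (score_word w = hi)) ↔
      (w ∈ ks ∧ score_word w = hi) := by
    intro w; rw [List.mem_filter]; simp
  by_cases h10 : ∃ w ∈ ks, score_word w = hi ∧ PySem.Str.len w = 10
  · obtain ⟨w10, hw10, hs10, hl10⟩ := h10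
    have hfind : (ks.filter (fun w => decide (score_word w = hi))).find?
          (fun word => PySem.Str.len word == 10)
        = ks.find? (fun w => decide (∀ y ∈ ks, pvKey y ≤ pvKey w)) := by
      rw [List.find?_filter]
      apply pv_find?_congr
      intro a _ha
      simp only [decide_eq_true_eq, beq_iff_eq, decide_eq_decide]
      constructor
      · rintro ⟨hsa, hla⟩ y hy
        rw [pv_key_le_iff]
        rcases eq_or_lt_of_le (hub y hy) with he | hl
        · right
          refine ⟨by rw [he, hsa], ?_⟩
          by_cases hly : PySem.Str.len y = 10
          · exact Or.inr ⟨⟨fun _ => hla, fun _ => hly⟩, by omega⟩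
          · exact Or.inl ⟨hly, hla⟩
        · left; omega
      · intro hall
        have h1 := (pv_key_le_iff w10 a).mp (hall w10 hw10)
        have ha' : score_word a ≤ hi := hub a (by assumption)
        have hsa : score_word a = hi := by
          rcases h1 with h | ⟨h, _⟩ <;> omega
        refine ⟨hsa, ?_⟩
        rcases h1 with h | ⟨_, h2⟩
        · omega
        · rcases h2 with ⟨h3, _⟩ | ⟨h3, _⟩
          · exact absurd hl10 h3
          · exact h3.mp hl10
    obtain ⟨r, hr⟩ : ∃ r, ks.find? (fun w => decide (∀ y ∈ ks, pvKey y ≤ pvKey w)) = some r := by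
      rw [← hfind]
      exact Option.isSome_iff_exists.mp
        (List.find?_isSome.mpr ⟨w10, (hmemF w10).mpr ⟨hw10, hs10⟩, by
          simp only [beq_iff_eq]; exact hl10⟩)
    unfold tie_breaker
    rw [hfind, hr]
  · have hne10 : ∀ w ∈ ks, score_word w = hi → PySem.Str.len w ≠ 10 :=
      fun w hw hs hl => h10 ⟨w, hw, hs, hl⟩
    have hnone : (ks.filter (fun w => decide (score_word w = hi))).find?
        (fun word => PySem.Str.len word == 10) = none := by
      apply List.find?_eq_none.mpr
      intro w hw
      have hw' := (hmemF w).mp hw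
      simp only [beq_iff_eq]
      exact hne10 w hw'.1 hw'.2
    obtain ⟨u, F', hFu⟩ := List.exists_cons_of_ne_nil hFne
    have hcomb : (fun (m y : String) => if PySem.Str.len y < PySem.Str.len m then y else m)
        = (fun b x => if OrderDual.toDual (PySem.Str.len b) < OrderDual.toDual (PySem.Str.len x)
                      then x else b) := by
      funext b x
      simp only [OrderDual.toDual_lt_toDual]
    have hmin : PySem.List.min? (u :: F') (fun word => PySem.Str.len word)
        = List.find? (fun w => decide (∀ y ∈ u :: F',
            OrderDual.toDual (PySem.Str.len y) ≤ OrderDual.toDual (PySem.Str.len w))) (u :: F') := by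
      rw [pv_min?_cons, hcomb]
      exact (pv_find?_cons_max (fun w : String => OrderDual.toDual (PySem.Str.len w)) F' u).symm
    have hmin2 : PySem.List.min? (ks.filter (fun w => decide (score_word w = hi)))
          (fun word => PySem.Str.len word)
        = ks.find? (fun w => decide (∀ y ∈ ks, pvKey y ≤ pvKey w)) := by
      rw [hFu, hmin, ← hFu]
      rw [show (fun w => decide (∀ y ∈ ks.filter (fun w => decide (score_word w = hi)),
            OrderDual.toDual (PySem.Str.len y) ≤ OrderDual.toDual (PySem.Str.len w)))
          = (fun w => decide (∀ y ∈ ks.filter (fun w => decide (score_word w = hi)),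
              PySem.Str.len w ≤ PySem.Str.len y)) from by
        funext w
        simp only [OrderDual.toDual_le_toDual]]
      rw [List.find?_filter]
      apply pv_find?_congr
      intro a ha
      simp only [decide_eq_true_eq, decide_eq_decide]
      constructor
      · rintro ⟨hsa, hminl⟩ y hy
        rw [pv_key_le_iff]
        rcases eq_or_lt_of_le (hub y hy) with he | hl
        · right
          refine ⟨by rw [he, hsa], ?_⟩
          refine Or.inr ⟨?_, hminl y ((hmemF y).mpr ⟨hy, he⟩)⟩
          constructor
          · intro hly; exact absurd hly (hne10 y hy he)
          · intro hla; exact absurd hla (hne10 a ha hsa)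
        · left; omega
      · intro hall
        have h1 := (pv_key_le_iff k0 a).mp (hall k0 hk0)
        have ha' : score_word a ≤ hi := hub a ha
        have hsa : score_word a = hi := by
          rcases h1 with h | ⟨h, _⟩ <;> omega
        refine ⟨hsa, ?_⟩
        intro y hy
        have hy' := (hmemF y).mp hy
        have h2 := (pv_key_le_iff y a).mp (hall y hy'.1)
        rcases h2 with h | ⟨_, h3⟩
        · omega
        · rcases h3 with ⟨_, h4⟩ | ⟨_, h4⟩
          · exact absurd h4 (hne10 a ha hsa)
          · exact h4
    obtain ⟨r, hr⟩ : ∃ r, PySem.List.min? (ks.filter (fun w => decide (score_word w = hi)))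
        (fun word => PySem.Str.len word) = some r := by
      rw [hFu, pv_min?_cons]
      exact ⟨_, rfl⟩
    unfold tie_breaker
    rw [hnone, hr, ← hmin2, hr]
    rfl

-- A on a nonempty list, with the loops computed away
theorem pv_A_cons (w : String) (rest : List String) :
    get_highest_word_score (w :: rest) =
      (let d := (w :: rest).foldl (fun d word => d.insert word (score_word word)) PySem.Dict.empty
       let hi := (PySem.List.max? d.values (fun v => v)).getD 0
       let F := d.keys.filter (fun x => decide (d.getD x 0 = hi))
       (if F.length = 1 then PySem.List.pyGetD F 0 "" else tie_breaker F, hi)) := by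
  unfold get_highest_word_score
  rw [pv_foldl_const]
  rw [if_neg (by simp : ¬ (w :: rest : List String) = [])]
  simp only []
  rw [pv_fold_filter (fun word =>
        ((w :: rest).foldl (fun d word => d.insert word (score_word word)) PySem.Dict.empty).getD word 0
          = (PySem.List.max? ((w :: rest).foldl (fun d word => d.insert word (score_word word)) PySem.Dict.empty).values (fun v => v)).getD 0)
      (fun word => ((w :: rest).foldl (fun d word => d.insert word (score_word word)) PySem.Dict.empty).getD word 0)]
  simp only [List.nil_append]

-- ===== VERDICT (by name: the statement is the Claim_ definition above) =====
theorem get_highest_word_score_spec : Claim_equal_get_highest_word_score := by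
  unfold Claim_equal_get_highest_word_score
  intro l _hdom hpre
  unfold Spec_get_highest_word_score
  obtain ⟨hne, _⟩ := hpre
  obtain ⟨w, rest, rfl⟩ := List.exists_cons_of_ne_nil hne
  rw [pv_A_cons]
  simp only []
  set d := (w :: rest).foldl (fun d word => d.insert word (score_word word)) PySem.Dict.empty with hd
  set hi := (PySem.List.max? d.values (fun v => v)).getD 0 with hhi
  have hks : d.keys = PySem.Set.ofList (w :: rest) := by
    rw [hd, PySem.Dict.keys_foldl_insert]
    rfl
  have hkeymem : ∀ k, k ∈ d.keys ↔ k ∈ (w :: rest) := by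
    intro k; rw [hks]; exact PySem.Set.mem_ofList _ k
  have hnd : d.keys.Nodup := by
    rw [hd]
    exact PySem.Dict.nodup_keys_foldl_insert _ _ _ (by simp [PySem.Dict.empty, PySem.Dict.keys])
  have hgetD : ∀ k ∈ d.keys, d.getD k 0 = score_word k := by
    intro k hk
    rw [hd, pv_getD_scores, if_pos ((hkeymem k).mp hk)]
  have hvals : d.values = d.keys.map score_word := by
    rw [PySem.Dict.values_eq_map_keys d hnd 0]
    exact List.map_congr_left hgetD
  have hkne : d.keys ≠ [] :=
    List.ne_nil_of_mem ((hkeymem w).mpr (by simp))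
  have hvne : d.values ≠ [] := by
    rw [hvals]
    simp only [ne_eq, List.map_eq_nil_iff]
    exact hkne
  have hchar := pv_hi_char d.values hvne
  rw [← hhi] at hchar
  have hmemhi : ∃ k ∈ d.keys, score_word k = hi := by
    have h1 := hchar.1
    rw [hvals] at h1
    obtain ⟨k, hk, he⟩ := List.mem_map.mp h1
    exact ⟨k, hk, he⟩
  have hubhi : ∀ k ∈ d.keys, score_word k ≤ hi := by
    intro k hk
    exact hchar.2 _ (by rw [hvals]; exact List.mem_map_of_mem hk)
  have hFeq : d.keys.filter (fun x => decide (d.getD x 0 = hi))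
      = d.keys.filter (fun x => decide (score_word x = hi)) :=
    List.filter_congr (fun x hx => by rw [hgetD x hx])
  have hsel := pv_tie_select d.keys hi hmemhi hubhi
  -- move the find? from d.keys to the original list
  have hofind : List.find? (fun x => decide (∀ y ∈ d.keys, pvKey y ≤ pvKey x)) d.keys
      = List.find? (fun x => decide (∀ y ∈ (w :: rest), pvKey y ≤ pvKey x)) (w :: rest) := by
    rw [show (fun x => decide (∀ y ∈ d.keys, pvKey y ≤ pvKey x))
        = (fun x => decide (∀ y ∈ (w :: rest), pvKey y ≤ pvKey x)) from by
      funext x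
      simp only [decide_eq_decide]
      constructor
      · intro hall y hy; exact hall y ((hkeymem y).mpr hy)
      · intro hall y hy; exact hall y ((hkeymem y).mp hy)]
    rw [hks]
    have h2 := pv_find?_foldl_add (fun x => decide (∀ y ∈ (w :: rest), pvKey y ≤ pvKey x)) (w :: rest) []
    rw [show PySem.Set.ofList (w :: rest) = (w :: rest).foldl PySem.Set.add [] from rfl]
    rw [h2]
    simp
  -- B computes the first key-maximal element of the list
  have hBcomb : (fun best word => if pvBeats word best then word else best)
      = (fun (b x : String) => if pvKey b < pvKey x then x else b) := by
    funext b x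
    rw [pvBeats_eq]
    by_cases h : pvKey b < pvKey x
    · simp [h]
    · simp [h]
  have hfB := pv_find?_cons_max pvKey rest w
  have hAB : List.find? (fun x => decide (∀ y ∈ (w :: rest), pvKey y ≤ pvKey x)) (w :: rest)
      = some (if (d.keys.filter (fun x => decide (score_word x = hi))).length = 1 then
                PySem.List.pyGetD (d.keys.filter (fun x => decide (score_word x = hi))) 0 ""
              else tie_breaker (d.keys.filter (fun x => decide (score_word x = hi)))) := by
    rw [← hofind, hsel]
  set bstar := rest.foldl (fun b x => if pvKey b < pvKey x then x else b) w with hbstar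
  have hb : List.find? (fun x => decide (∀ y ∈ (w :: rest), pvKey y ≤ pvKey x)) (w :: rest)
      = some bstar := hfB
  have hsome := hAB.symm.trans hb
  have heqb : (if (d.keys.filter (fun x => decide (score_word x = hi))).length = 1 then
                PySem.List.pyGetD (d.keys.filter (fun x => decide (score_word x = hi))) 0 ""
              else tie_breaker (d.keys.filter (fun x => decide (score_word x = hi)))) = bstar :=
    Option.some.inj hsome
  have hPb : ∀ y ∈ (w :: rest), pvKey y ≤ pvKey bstar := by
    have := List.find?_some hb
    simpa using this
  have hbmem : bstar ∈ (w :: rest) := List.mem_of_find?_eq_some hb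
  have hsb : score_word bstar = hi := by
    obtain ⟨k, hk, hkhi⟩ := hmemhi
    have h1 := (pv_key_le_iff k bstar).mp (hPb k ((hkeymem k).mp hk))
    have h2 : score_word k ≤ score_word bstar := by
      rcases h1 with h | ⟨h, _⟩ <;> omega
    have h3 : score_word bstar ≤ hi := hubhi bstar ((hkeymem bstar).mpr hbmem)
    omega
  rw [hFeq, heqb]
  unfold get_highest_word_score_alt
  simp only [hBcomb]
  rw [← hbstar, hsb]
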